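-- pv_equiv track=rewrite | github.com/dbt-labs/dbt-spark | test/custom/base.py | _profile_from_test_name
-- ===== SOURCE A (Python) =====
-- def _profile_from_test_name(test_name):
--     adapter_names = ('apache_spark', 'databricks_cluster',
--                      'databricks_sql_endpoint')
--     adapters_in_name = sum(x in test_name for x in adapter_names)
--     if adapters_in_name != 1:
--         raise ValueError(
--             'test names must have exactly 1 profile choice embedded, {} has {}'
--             .format(test_name, adapters_in_name)
--         )
--
--     for adapter_name in adapter_names:
--         if adapter_name in test_name:
--             return adapter_name
--
--     raise ValueError(
--         'could not find adapter name in test name {}'.format(test_name)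
--     )
-- ===== SOURCE B (Python) =====
-- def _profile_from_test_name(test_name):
--     def unique_match(names):
--         # recursively find the unique adapter name embedded in test_name,
--         # raising as soon as a second match is discovered
--         if not names:
--             return None
--         rest = unique_match(names[1:])
--         if names[0] in test_name:
--             if rest is not None:
--                 raise ValueError(
--                     'test names must have exactly 1 profile choice embedded, '
--                     '{} has more than one'.format(test_name)
--                 )
--             return names[0]
--         return rest
--
--     found = unique_match(('apache_spark', 'databricks_cluster',
--                           'databricks_sql_endpoint'))
--     if found is None:
--         raise ValueError(
--             'test names must have exactly 1 profile choice embedded, '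
--             '{} has none'.format(test_name)
--         )
--     return found
-- ===== Notes on version B (the rewrite author's own statement) =====
-- stated objective: alternative
-- what changed: Recursive single-pass unique-search over the adapter list that raises the moment a second match appears, with no counting pass and no second rescan loop, instead of A's sum-then-rescan two-pass structure.
import Mathlib
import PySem

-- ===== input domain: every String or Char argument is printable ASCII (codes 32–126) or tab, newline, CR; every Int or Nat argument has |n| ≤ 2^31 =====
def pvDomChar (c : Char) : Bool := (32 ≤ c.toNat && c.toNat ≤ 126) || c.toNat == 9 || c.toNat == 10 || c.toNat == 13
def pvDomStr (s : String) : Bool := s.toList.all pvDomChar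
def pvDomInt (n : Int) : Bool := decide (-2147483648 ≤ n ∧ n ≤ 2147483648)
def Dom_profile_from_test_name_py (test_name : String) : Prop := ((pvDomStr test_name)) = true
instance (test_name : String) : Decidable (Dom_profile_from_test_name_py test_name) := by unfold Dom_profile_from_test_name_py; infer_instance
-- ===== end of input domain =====

-- B replaces A's count-then-rescan two-pass structure by a recursive single-pass
-- unique-search that fails as soon as a second match appears (alternative decomposition).

-- ===== PORT A =====
def profile_from_test_name_py (test_name : String) : String :=
  let adapter_names := ["apache_spark", "databricks_cluster", "databricks_sql_endpoint"]
  let adapters_in_name :=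
    adapter_names.foldl (fun acc x => acc + (if PySem.Str.isIn x test_name then 1 else 0)) 0
  if adapters_in_name ≠ 1 then ""  -- ValueError: excluded by Pre_
  else
    match adapter_names.find? (fun a => PySem.Str.isIn a test_name) with
    | some a => a
    | none => ""  -- the final 'raise' (unreachable under Pre_)

-- ===== PORT B =====
-- recursion of Source B's unique_match; `none` (outer) = the ValueError raised on a second match
def pvUniqueMatch (test_name : String) : List String → Option (Option String)
  | [] => some none
  | x :: rest =>
    match pvUniqueMatch test_name rest with
    | none => none  -- exception propagates
    | some tail =>
      if PySem.Str.isIn x test_name then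
        match tail with
        | some _ => none  -- raise: second match
        | none => some (some x)
      else some tail

def profile_from_test_name_py_alt (test_name : String) : String :=
  match pvUniqueMatch test_name
      ["apache_spark", "databricks_cluster", "databricks_sql_endpoint"] with
  | some (some found) => found
  | some none => ""  -- ValueError: no match, excluded by Pre_
  | none => ""       -- ValueError: more than one match, excluded by Pre_

-- ===== PRECONDITION & SPEC =====
-- Pre_ holds exactly when exactly one adapter name occurs in test_name; otherwise A (and B) raise ValueError.
def Pre_profile_from_test_name_py (test_name : String) : Prop :=
  ((if PySem.Str.isIn "apache_spark" test_name then 1 else 0) +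
   (if PySem.Str.isIn "databricks_cluster" test_name then 1 else 0) +
   (if PySem.Str.isIn "databricks_sql_endpoint" test_name then (1 : Nat) else 0)) = 1
instance (test_name : String) : Decidable (Pre_profile_from_test_name_py test_name) := by
  unfold Pre_profile_from_test_name_py; infer_instance

def pvWitness_profile_from_test_name_py : String := "test_apache_spark_ok"

def Spec_profile_from_test_name_py (test_name : String) (out : String) : Prop := out = profile_from_test_name_py_alt test_name
instance (test_name : String) (out : String) : Decidable (Spec_profile_from_test_name_py test_name out) := by unfold Spec_profile_from_test_name_py; infer_instance

-- ===== CLAIM (what is proved, stated in full; the proofs are below) =====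
def Claim_equal_profile_from_test_name_py : Prop := ∀ (test_name : String), Dom_profile_from_test_name_py test_name → Pre_profile_from_test_name_py test_name → Spec_profile_from_test_name_py test_name (profile_from_test_name_py test_name)

-- ===== LEMMAS AND PROOFS =====

-- ===== VERDICT =====
theorem profile_from_test_name_py_spec : Claim_equal_profile_from_test_name_py := by
  intro t _ hpre
  unfold Pre_profile_from_test_name_py at hpre
  unfold Spec_profile_from_test_name_py profile_from_test_name_py profile_from_test_name_py_alt
  by_cases h1 : PySem.Str.isIn "apache_spark" t = true <;>
  by_cases h2 : PySem.Str.isIn "databricks_cluster" t = true <;>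
  by_cases h3 : PySem.Str.isIn "databricks_sql_endpoint" t = true <;>
    (simp [PySem.Str.isIn] at h1 h2 h3 <;>
     simp [h1, h2, h3, List.foldl, List.find?, pvUniqueMatch] at hpre ⊢)
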